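-- pv_equiv track=rewrite | github.com/ngschmidt/FWRater | fwrater.py | splitByToken
-- ===== SOURCE A (Python) =====
-- def splitByToken(list_to_split,list_token):
--     return_list = []
--     list_temp = []
--     for i in list_to_split:
--         if i.startswith(list_token) and list_temp:
--             return_list.append(list_temp[:])
--             list_temp = []
--         list_temp.append(i)
--     return_list.append(list_temp)
--     return return_list
-- ===== SOURCE B (Python) =====
-- def splitByToken(list_to_split, list_token):
--     # span-based front recursion: each group is its first element followed by
--     # the maximal run of non-token elements; no running accumulator.
--     def span_nontoken(xs):
--         k = 0
--         while k < len(xs) and not xs[k].startswith(list_token):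
--             k += 1
--         return xs[:k], xs[k:]
--
--     def go(x, xs):
--         run, rest = span_nontoken(xs)
--         group = [x] + run
--         if rest:
--             return [group] + go(rest[0], rest[1:])
--         return [group]
--
--     if not list_to_split:
--         return [[]]
--     return go(list_to_split[0], list_to_split[1:])
-- ===== Notes on version B (the rewrite author's own statement) =====
-- stated objective: alternative
-- what changed: A maintains a running current-chunk accumulator flushed inside one left-to-right loop; B recurses on group boundaries, carving each group out whole as head element plus the maximal span of non-token elements.
import Mathlib
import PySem

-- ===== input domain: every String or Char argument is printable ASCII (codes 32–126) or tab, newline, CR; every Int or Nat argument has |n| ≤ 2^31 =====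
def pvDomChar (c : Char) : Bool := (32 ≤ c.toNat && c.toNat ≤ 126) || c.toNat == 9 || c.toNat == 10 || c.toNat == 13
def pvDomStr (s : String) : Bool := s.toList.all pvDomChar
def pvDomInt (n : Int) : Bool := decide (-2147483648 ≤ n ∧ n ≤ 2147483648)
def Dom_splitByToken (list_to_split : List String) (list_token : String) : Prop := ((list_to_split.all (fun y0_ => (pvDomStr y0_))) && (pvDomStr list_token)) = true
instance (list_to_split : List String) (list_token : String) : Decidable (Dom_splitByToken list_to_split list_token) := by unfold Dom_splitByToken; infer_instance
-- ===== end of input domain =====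

-- B replaces A's running-chunk accumulator loop by a span-based recursion on group boundaries (alternative decomposition, same cost).

-- ===== PORT A =====
-- A: one loop with state (return_list, list_temp); flush list_temp when a token element arrives and list_temp is nonempty.
def sbtStep (list_token : String) (st : List (List String) × List String) (i : String) :
    List (List String) × List String :=
  if PySem.Str.startswith i list_token && !st.2.isEmpty then
    (st.1 ++ [st.2], [i])
  else
    (st.1, st.2 ++ [i])

def splitByToken (list_to_split : List String) (list_token : String) : List (List String) :=
  let st := list_to_split.foldl (sbtStep list_token) ([], [])
  st.1 ++ [st.2]

-- ===== PORT B =====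
-- span_nontoken: the inner while loop + two slices of Source B (maximal prefix of non-token elements, and the rest)
def sbtSpanNontoken (list_token : String) (xs : List String) : List String × List String :=
  xs.span (fun y => !PySem.Str.startswith y list_token)

-- go: each group is its first element plus the non-token run; recurse on the rest
def sbtGo (list_token : String) (x : String) (xs : List String) : List (List String) :=
  let p := sbtSpanNontoken list_token xs
  let group := x :: p.1
  if p.2.isEmpty then
    [group]
  else
    group :: sbtGo list_token p.2.head! p.2.tail
termination_by xs.length
decreasing_by
  have h := ‹¬p.2.isEmpty = true›
  have hne : (sbtSpanNontoken list_token xs).2 ≠ [] := by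
    simpa [List.isEmpty_iff, p] using h
  have hle : (sbtSpanNontoken list_token xs).2.length ≤ xs.length := by
    rw [sbtSpanNontoken, List.span_eq_takeWhile_dropWhile]
    exact List.length_dropWhile_le _ _
  have hpos : 0 < (sbtSpanNontoken list_token xs).2.length := List.length_pos_iff.2 hne
  have ht : (sbtSpanNontoken list_token xs).2.tail.length = (sbtSpanNontoken list_token xs).2.length - 1 :=
    List.length_tail
  omega

def splitByToken_alt (list_to_split : List String) (list_token : String) : List (List String) :=
  match list_to_split with
  | [] => [[]]
  | x :: xs => sbtGo list_token x xs

-- ===== PRECONDITION & SPEC =====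
def Spec_splitByToken (list_to_split : List String) (list_token : String) (out : List (List String)) : Prop := out = splitByToken_alt list_to_split list_token
instance (list_to_split : List String) (list_token : String) (out : List (List String)) : Decidable (Spec_splitByToken list_to_split list_token out) := by unfold Spec_splitByToken; infer_instance

-- ===== CLAIM (what is proved, stated in full; the proofs are below) =====
def Claim_equal_splitByToken : Prop := ∀ (list_to_split : List String) (list_token : String), Dom_splitByToken list_to_split list_token → Spec_splitByToken list_to_split list_token (splitByToken list_to_split list_token)

-- ===== LEMMAS AND PROOFS =====

def sbtTailGroups (t : String) (l : List String) : List (List String) :=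
  match l with
  | [] => []
  | y :: ys => sbtGo t y ys

theorem sbtGo_eq (t x : String) (xs : List String) :
    sbtGo t x xs =
      (x :: xs.takeWhile (fun y => !PySem.Str.startswith y t)) ::
        sbtTailGroups t (xs.dropWhile (fun y => !PySem.Str.startswith y t)) := by
  unfold sbtGo
  simp only [sbtSpanNontoken, List.span_eq_takeWhile_dropWhile]
  cases h : xs.dropWhile (fun y => !PySem.Str.startswith y t) with
  | nil => simp [sbtTailGroups]
  | cons y ys => simp [sbtTailGroups]

theorem sbt_foldl_lem (t : String) (l : List String) :
    ∀ (ret : List (List String)) (temp : List String), temp ≠ [] →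
      (l.foldl (sbtStep t) (ret, temp)).1 ++ [(l.foldl (sbtStep t) (ret, temp)).2] =
      ret ++ ((temp ++ l.takeWhile (fun y => !PySem.Str.startswith y t)) ::
        sbtTailGroups t (l.dropWhile (fun y => !PySem.Str.startswith y t))) := by
  induction l with
  | nil => intro ret temp _; simp [sbtTailGroups]
  | cons x xs ih =>
    intro ret temp htemp
    rw [List.foldl_cons]
    by_cases hm : PySem.Str.startswith x t = true
    · have hm' : PySem.Chars.startswith x.toList t.toList = true := by simpa using hm
      have hstep : sbtStep t (ret, temp) x = (ret ++ [temp], [x]) := by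
        simp only [sbtStep, hm, List.isEmpty_eq_false_iff.2 htemp]
        rfl
      rw [hstep, ih (ret ++ [temp]) [x] (by simp),
        List.takeWhile_cons_of_neg (by simpa using hm),
        List.dropWhile_cons_of_neg (by simpa using hm)]
      rw [show sbtTailGroups t (x :: xs) = sbtGo t x xs from rfl, sbtGo_eq]
      simp
    · have hm' : PySem.Chars.startswith x.toList t.toList = false := by simpa using hm
      have hstep : sbtStep t (ret, temp) x = (ret, temp ++ [x]) := by
        simp [sbtStep, hm']
      rw [hstep, ih ret (temp ++ [x]) (by simp),
        List.takeWhile_cons_of_pos (by simpa using hm'),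
        List.dropWhile_cons_of_pos (by simpa using hm')]
      simp

-- ===== VERDICT (by name: the statement is the Claim_ definition above) =====
theorem splitByToken_spec : Claim_equal_splitByToken := by
  intro l t _
  unfold Spec_splitByToken
  cases l with
  | nil => rfl
  | cons x xs =>
    show (((x :: xs).foldl (sbtStep t) ([], [])).1 ++ [((x :: xs).foldl (sbtStep t) ([], [])).2]) = _
    rw [List.foldl_cons]
    have hstep : sbtStep t ([], []) x = ([], [x]) := by
      simp [sbtStep]
    rw [hstep, sbt_foldl_lem t xs [] [x] (by simp)]
    rw [show splitByToken_alt (x :: xs) t = sbtGo t x xs from rfl, sbtGo_eq]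
    simp [sbtTailGroups]
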